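-- pv_equiv track=rewrite | github.com/shashankgoyl/email_draft_generator_backend | email_provider.py | clean_subject
-- ===== SOURCE A (Python) =====
-- def clean_subject(subject: str) -> str:
--     prefixes = ['Re:', 'RE:', 'Fwd:', 'FWD:', 'Fw:']
--     cleaned  = subject.strip()
--     while any(cleaned.startswith(p) for p in prefixes):
--         for p in prefixes:
--             if cleaned.startswith(p):
--                 cleaned = cleaned[len(p):].strip()
--                 break
--     return cleaned or subject
-- ===== SOURCE B (Python) =====
-- def clean_subject(subject: str) -> str:
--     # Single index-based scan: strip once, then advance an index past each
--     # case-exact prefix and the whitespace after it; no repeated slicing/strip.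
--     s = subject.strip()
--     n = len(s)
--     i = 0
--     while True:
--         for p in ('Re:', 'RE:', 'Fwd:', 'FWD:', 'Fw:'):
--             if s.startswith(p, i):
--                 i += len(p)
--                 while i < n and s[i].isspace():
--                     i += 1
--                 break
--         else:
--             return s[i:] or subject
-- ===== Notes on version B (the rewrite author's own statement) =====
-- stated objective: alternative
-- what changed: B replaces A's repeated slice-and-strip while/for loop (which rebuilds the string after every prefix removal) with a single left-to-right index scan over the once-stripped string: an index is advanced past each case-exact prefix and the whitespace run after it, and one final slice produces the result.
import Mathlib
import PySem

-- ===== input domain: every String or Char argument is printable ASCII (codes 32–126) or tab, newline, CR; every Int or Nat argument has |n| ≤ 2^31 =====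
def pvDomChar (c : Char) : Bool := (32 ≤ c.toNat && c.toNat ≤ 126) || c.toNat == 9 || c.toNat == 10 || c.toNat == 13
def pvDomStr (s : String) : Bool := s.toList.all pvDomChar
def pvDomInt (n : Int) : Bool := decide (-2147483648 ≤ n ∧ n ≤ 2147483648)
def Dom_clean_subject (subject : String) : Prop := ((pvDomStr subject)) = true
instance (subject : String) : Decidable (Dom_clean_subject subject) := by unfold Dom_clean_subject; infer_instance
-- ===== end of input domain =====

-- B replaces A's repeated slice-and-strip loop with a single index scan over the
-- once-stripped string (objective: alternative; return values proved equal).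

-- the prefix tuple both Pythons share, in source order
def pvPrefixes : List (List Char) :=
  [['R','e',':'], ['R','E',':'], ['F','w','d',':'], ['F','W','D',':'], ['F','w',':']]

-- ===== PORT A =====
-- while any(cleaned.startswith(p) for p in prefixes): for p in prefixes: if …: cleaned = cleaned[len(p):].strip(); break
-- (the for-with-break picks the FIRST matching prefix = List.find?; the fuel
-- only makes the while total — each step removes ≥ 3 chars, so fuel = length suffices)
def pvLoopA : Nat → List Char → List Char
  | 0, cleaned => cleaned
  | fuel + 1, cleaned =>
    match pvPrefixes.find? (fun p => PySem.Chars.startswith cleaned p) with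
    | some p => pvLoopA fuel (PySem.Chars.strip (cleaned.drop p.length))
    | none => cleaned

def clean_subject (subject : String) : String :=
  let stripped := PySem.Chars.strip subject.toList
  let cleaned := pvLoopA stripped.length stripped
  if cleaned.isEmpty then subject else String.mk cleaned

-- ===== PORT B =====
-- while i < n and s[i].isspace(): i += 1   (fuel = n is enough: i grows each step)
def pvSkipWs (s : List Char) : Nat → Nat → Nat
  | 0, i => i
  | fuel + 1, i =>
    if h : i < s.length then
      if PySem.Chars.isspace s[i] then pvSkipWs s fuel (i + 1) else i
    else i

-- the outer while/for of Source B; s.startswith(p, i) is ported exactly (for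
-- 0 ≤ i) as p.isPrefixOf (s.drop i); fuel = n again only makes it total
def pvLoopB (s : List Char) : Nat → Nat → Nat
  | 0, i => i
  | fuel + 1, i =>
    match pvPrefixes.find? (fun p => PySem.Chars.startswith (s.drop i) p) with
    | some p => pvLoopB s fuel (pvSkipWs s s.length (i + p.length))
    | none => i

def clean_subject_alt (subject : String) : String :=
  let s := PySem.Chars.strip subject.toList
  let r := s.drop (pvLoopB s s.length 0)
  if r.isEmpty then subject else String.mk r

-- ===== PRECONDITION & SPEC =====
def Spec_clean_subject (subject : String) (out : String) : Prop := out = clean_subject_alt subject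
instance (subject : String) (out : String) : Decidable (Spec_clean_subject subject out) := by unfold Spec_clean_subject; infer_instance

-- ===== CLAIM (what is proved, stated in full; the proofs are below) =====
def Claim_equal_clean_subject : Prop := ∀ (subject : String), Dom_clean_subject subject → Spec_clean_subject subject (clean_subject subject)

-- ===== LEMMAS AND PROOFS =====

theorem pvPrefixes_len {p : List Char} (hp : p ∈ pvPrefixes) : 3 ≤ p.length := by
  fin_cases hp <;> simp

-- "no trailing whitespace"
def pvNTW (s : List Char) : Prop :=
  ∀ (h : s ≠ []), PySem.Chars.isspace (s.getLast h) = false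

theorem pvRstrip_eq_self {s : List Char} (hs : pvNTW s) :
    PySem.Chars.rstrip s = s := by
  rcases eq_or_ne s [] with rfl | hne
  · rfl
  · have hrev : s.reverse ≠ [] := by simpa using hne
    have hhead : PySem.Chars.isspace (s.reverse.head hrev) = false := by
      rw [← List.getLast_eq_head_reverse hne]; exact hs hne
    have : List.dropWhile PySem.Chars.isspace s.reverse = s.reverse := by
      rw [List.dropWhile_eq_self_iff]
      intro hl
      have : s.reverse[0] = s.reverse.head hrev := List.getElem_zero_eq_head hl
      rw [this, hhead]; simp
    simp [PySem.Chars.rstrip, this]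

theorem pvNTW_strip (l : List Char) : pvNTW (PySem.Chars.strip l) := by
  intro h
  simp only [PySem.Chars.strip, PySem.Chars.rstrip] at h ⊢
  have hdw : List.dropWhile PySem.Chars.isspace (PySem.Chars.lstrip l).reverse ≠ [] := by
    simpa using h
  rw [List.getLast_reverse]
  exact List.head_dropWhile_not _ hdw

theorem pvNTW_drop {s : List Char} (hs : pvNTW s) (k : Nat) : pvNTW (s.drop k) := by
  intro h
  have hne : s ≠ [] := by
    intro hnil; subst hnil; simp at h
  have : (s.drop k).getLast h = s.getLast hne := by
    have hk : k < s.length := by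
      by_contra hk
      exact h (List.drop_eq_nil_of_le (by omega))
    rw [List.getLast_eq_getElem, List.getLast_eq_getElem, List.getElem_drop]
    congr 1
    simp [List.length_drop]
    omega
  rw [this]; exact hs hne

theorem pvSkipWs_ge (s : List Char) (f i : Nat) : i ≤ pvSkipWs s f i := by
  induction f generalizing i with
  | zero => simp [pvSkipWs]
  | succ f ih =>
    unfold pvSkipWs
    split
    · split
      · exact le_trans (by omega) (ih (i + 1))
      · omega
    · omega

theorem pvSkipWs_drop (s : List Char) (f i : Nat) (hf : s.length - i ≤ f) :
    s.drop (pvSkipWs s f i) = List.dropWhile PySem.Chars.isspace (s.drop i) := by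
  induction f generalizing i with
  | zero =>
    have : s.drop i = [] := List.drop_eq_nil_of_le (by omega)
    simp [pvSkipWs, this]
  | succ f ih =>
    unfold pvSkipWs
    split
    next hlt =>
      have hcons : s.drop i = s[i] :: s.drop (i + 1) := List.drop_eq_getElem_cons hlt
      split
      next hsp =>
        rw [ih (i + 1) (by omega), hcons, List.dropWhile_cons, if_pos hsp]
      next hsp =>
        rw [hcons, List.dropWhile_cons, if_neg (by simp [hsp])]
    next hlt =>
      have : s.drop i = [] := List.drop_eq_nil_of_le (by omega)
      simp [this]

theorem pvStrip_drop {s : List Char} (hs : pvNTW s) (f j : Nat) (hf : s.length - j ≤ f) :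
    PySem.Chars.strip (s.drop j) = s.drop (pvSkipWs s f j) := by
  rw [pvSkipWs_drop s f j hf]
  show PySem.Chars.rstrip (PySem.Chars.lstrip (s.drop j)) = _
  rw [PySem.Chars.lstrip, ← pvSkipWs_drop s f j hf]
  exact pvRstrip_eq_self (pvNTW_drop hs _)

theorem pvMain {s : List Char} (hs : pvNTW s) :
    ∀ (fb fa i : Nat), s.length - i ≤ fa → s.length - i ≤ fb →
      pvLoopA fa (s.drop i) = s.drop (pvLoopB s fb i) := by
  intro fb
  induction fb with
  | zero =>
    intro fa i hfa hfb
    have hnil : s.drop i = [] := List.drop_eq_nil_of_le (by omega)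
    rw [hnil]
    have hfind : pvPrefixes.find? (fun p => PySem.Chars.startswith [] p) = none := by decide
    cases fa with
    | zero => simp [pvLoopA, pvLoopB, hnil]
    | succ fa => simp [pvLoopA, pvLoopB, hfind, hnil]
  | succ fb ih =>
    intro fa i hfa hfb
    unfold pvLoopB
    split
    next p hp =>
      have hmem : p ∈ pvPrefixes := List.mem_of_find?_eq_some hp
      have hpref : p <+: s.drop i :=
        (PySem.Chars.startswith_iff _ _).mp (List.find?_some hp)
      have h3 : 3 ≤ p.length := pvPrefixes_len hmem
      have hle : p.length ≤ (s.drop i).length := hpref.length_le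
      simp only [List.length_drop] at hle
      cases fa with
      | zero => omega
      | succ fa =>
        rw [pvLoopA, hp]
        show pvLoopA fa (PySem.Chars.strip ((s.drop i).drop p.length)) = _
        set i' := pvSkipWs s s.length (i + p.length) with hi'
        have hge : i + p.length ≤ i' := pvSkipWs_ge s s.length (i + p.length)
        rw [List.drop_drop, pvStrip_drop hs s.length (i + p.length) (by omega)]
        exact ih fa i' (by omega) (by omega)
    next hp =>
      cases fa with
      | zero =>
        have : s.drop i = [] := List.drop_eq_nil_of_le (by omega)
        simp [pvLoopA, this]
      | succ fa =>
        rw [pvLoopA, hp]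

-- ===== VERDICT (by name: the statement is the Claim_ definition above) =====
theorem clean_subject_spec : Claim_equal_clean_subject := by
  intro subject _
  show clean_subject subject = clean_subject_alt subject
  have h := pvMain (pvNTW_strip subject.toList) (PySem.Chars.strip subject.toList).length
      (PySem.Chars.strip subject.toList).length 0 (by omega) (by omega)
  rw [List.drop_zero] at h
  simp only [clean_subject, clean_subject_alt, h]
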